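-- pv_equiv track=rewrite | github.com/pressogh/algorithm | python/solved/2607 비슷한 단어.py | check
-- ===== SOURCE A (Python) =====
-- import string
-- from collections import Counter
--
-- def check(s1, s2):
--     c1, c2 = Counter(s1 + ''.join(string.ascii_uppercase)), Counter(s2 + ''.join(string.ascii_uppercase))
--     diff_cnt = 0
--     for s in string.ascii_uppercase:
--         c = abs(c1.get(s) - c2.get(s))
--
--         if c == 0: continue
--         elif c == 1: diff_cnt += 1
--         else: return 0
--
--     if diff_cnt == 0: return 1
--     if len(s1) == len(s2): return 1 if diff_cnt == 2 else 0
--     return 1 if diff_cnt == 1 else 0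
-- ===== SOURCE B (Python) =====
-- import string
--
-- def check(s1, s2):
--     # multiset cancellation: cancel each uppercase letter of s1 against one
--     # occurrence in s2; whatever survives on either side is the difference.
--     only1 = []
--     rest2 = [ch for ch in s2 if ch in string.ascii_uppercase]
--     for ch in s1:
--         if ch in string.ascii_uppercase:
--             if ch in rest2:
--                 rest2.remove(ch)
--             else:
--                 only1.append(ch)
--     extras = only1 + rest2
--     if len(set(extras)) != len(extras):
--         return 0
--     if not extras:
--         return 1
--     if len(s1) == len(s2):
--         return 1 if len(extras) == 2 else 0
--     return 1 if len(extras) == 1 else 0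
-- ===== Notes on version B (the rewrite author's own statement) =====
-- stated objective: alternative
-- what changed: B replaces A's per-letter frequency-table scan (Counters over the padded alphabet) with multiset cancellation: it cancels each uppercase letter of s1 against an occurrence in s2 via list.remove, concatenates the surviving letters of both sides into one extras list, and decides from that list (a duplicate in it means some letter gap > 1; its length is A's diff_cnt).
import Mathlib
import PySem

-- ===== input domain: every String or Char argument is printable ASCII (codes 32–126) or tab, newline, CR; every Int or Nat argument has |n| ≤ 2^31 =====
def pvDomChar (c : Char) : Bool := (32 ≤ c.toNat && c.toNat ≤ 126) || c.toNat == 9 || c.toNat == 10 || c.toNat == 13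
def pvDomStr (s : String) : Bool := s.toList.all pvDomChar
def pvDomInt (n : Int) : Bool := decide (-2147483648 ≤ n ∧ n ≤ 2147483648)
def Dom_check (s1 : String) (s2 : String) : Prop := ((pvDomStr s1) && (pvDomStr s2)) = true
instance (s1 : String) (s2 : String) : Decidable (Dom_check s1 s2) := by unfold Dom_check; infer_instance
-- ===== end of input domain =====

-- B replaces A's per-letter frequency-table scan by multiset cancellation of the
-- two words' uppercase letters; same return value, not claimed faster.

-- ===== PORT A =====
-- A pads both strings with one copy of each uppercase letter (Counter(s + ascii_uppercase)),
-- then scans the 26 letters with an early return 0 on a count gap > 1.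
def pvUpper : List Char := "ABCDEFGHIJKLMNOPQRSTUVWXYZ".toList

def checkLoop (t1 t2 : List Char) : List Char → Int → Option Int
  | [], d => some d
  | s :: rest, d =>
    let c : Int := |((t1.count s : Int) - (t2.count s : Int))|
    if c = 0 then checkLoop t1 t2 rest d
    else if c = 1 then checkLoop t1 t2 rest (d + 1)
    else none

def check (s1 : String) (s2 : String) : Int :=
  let t1 := s1.toList ++ pvUpper
  let t2 := s2.toList ++ pvUpper
  match checkLoop t1 t2 pvUpper 0 with
  | none => 0
  | some diff_cnt =>
    if diff_cnt = 0 then 1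
    else if s1.toList.length = s2.toList.length then (if diff_cnt = 2 then 1 else 0)
    else (if diff_cnt = 1 then 1 else 0)

-- ===== PORT B =====
-- B cancels each uppercase letter of s1 against one occurrence in s2 (list.remove),
-- concatenates the surviving letters of both sides into 'extras', and decides from
-- that list: a duplicate in it means some letter's count gap exceeds 1.
def pvIsUpper (c : Char) : Bool := pvUpper.contains c    -- 'ch in string.ascii_uppercase'

-- 'for ch in s1: if upper: if ch in rest2: rest2.remove(ch) else: only1.append(ch)'
def loopB : List Char → List Char → List Char → List Char × List Char
  | [], rest2, only1 => (only1, rest2)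
  | ch :: a, rest2, only1 =>
    if rest2.contains ch then loopB a (rest2.erase ch) only1
    else loopB a rest2 (only1 ++ [ch])

def check_alt (s1 : String) (s2 : String) : Int :=
  let rest2 := s2.toList.filter pvIsUpper
  let p := loopB (s1.toList.filter pvIsUpper) rest2 []
  let extras := p.1 ++ p.2
  if (PySem.Set.ofList extras).length ≠ extras.length then 0
  else if extras = [] then 1
  else if s1.toList.length = s2.toList.length then (if extras.length = 2 then 1 else 0)
  else (if extras.length = 1 then 1 else 0)

-- ===== PRECONDITION & SPEC =====
def Spec_check (s1 : String) (s2 : String) (out : Int) : Prop := out = check_alt s1 s2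
instance (s1 : String) (s2 : String) (out : Int) : Decidable (Spec_check s1 s2 out) := by unfold Spec_check; infer_instance

-- ===== CLAIM (what is proved, stated in full; the proofs are below) =====
def Claim_equal_check : Prop := ∀ (s1 : String) (s2 : String), Dom_check s1 s2 → Spec_check s1 s2 (check s1 s2)

-- ===== LEMMAS AND PROOFS =====

-- A's early-return scan equals table passes over the per-letter gaps.
theorem checkLoop_eq (t1 t2 : List Char) (L : List Char) (d : Int) :
    checkLoop t1 t2 L d =
      (let diffs := L.map (fun c => |((t1.count c : Int) - (t2.count c : Int))|)
       if diffs.any (fun x => x > 1) then none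
       else some (d + ((diffs.filter (fun x => x = 1)).length : Int))) := by
  induction L generalizing d with
  | nil => simp [checkLoop]
  | cons c rest ih =>
    have hnn : (0 : Int) ≤ |((t1.count c : Int) - (t2.count c : Int))| := abs_nonneg _
    simp only [checkLoop, List.map_cons, List.any_cons, List.filter_cons]
    by_cases h0 : |((t1.count c : Int) - (t2.count c : Int))| = 0
    · have hgt : ¬ (|((t1.count c : Int) - (t2.count c : Int))| > 1) := by omega
      simp [h0, ih]
    · by_cases h1 : |((t1.count c : Int) - (t2.count c : Int))| = 1
      · have hgt : ¬ (|((t1.count c : Int) - (t2.count c : Int))| > 1) := by omega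
        simp [h1, ih]
        split
        · simp
        · simp; ring
      · have hgt : |((t1.count c : Int) - (t2.count c : Int))| > 1 := by omega
        simp [h0, h1, hgt]

-- padding both strings with the same uppercase copy does not change the per-letter gap
theorem count_pad (s1 s2 : List Char) (c : Char) :
    |(((s1 ++ pvUpper).count c : Int) - ((s2 ++ pvUpper).count c : Int))|
      = |((s1.count c : Int) - (s2.count c : Int))| := by
  simp only [List.count_append]
  push_cast
  ring_nf

-- per-letter counts of loopB's two outputs: truncated differences of the inputs' counts
theorem loopB_count (c : Char) :
    ∀ (a b acc : List Char),
      (loopB a b acc).1.count c = acc.count c + (a.count c - b.count c) ∧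
      (loopB a b acc).2.count c = b.count c - a.count c := by
  intro a
  induction a with
  | nil => intro b acc; simp [loopB]
  | cons ch a ih =>
    intro b acc
    have hcc : (ch :: a).count c = a.count c + (if c = ch then 1 else 0) := by
      rcases eq_or_ne c ch with rfl | hne
      · simp [List.count_cons_self]
      · simp [hne, Ne.symm hne]
    by_cases hmem : b.contains ch
    · have hb : ch ∈ b := by simpa using hmem
      have hpos : 1 ≤ b.count ch := List.count_pos_iff.2 hb
      have hl : loopB (ch :: a) b acc = loopB a (b.erase ch) acc := by
        simp only [loopB, hmem, if_true]
      have herase : (b.erase ch).count c = b.count c - if c = ch then 1 else 0 := by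
        rcases eq_or_ne c ch with rfl | hne
        · simp [List.count_erase_self]
        · simp [List.count_erase_of_ne hne, hne]
      obtain ⟨h1, h2⟩ := ih (b.erase ch) acc
      rw [hl]
      refine ⟨?_, ?_⟩
      · rw [h1, herase, hcc]
        split_ifs with h
        · subst h; omega
        · omega
      · rw [h2, herase, hcc]
        split_ifs with h
        · subst h; omega
        · omega
    · have hb : ch ∉ b := by simpa using hmem
      have hb0 : b.count ch = 0 := List.count_eq_zero.2 hb
      have hl : loopB (ch :: a) b acc = loopB a b (acc ++ [ch]) := by
        simp only [loopB, hmem, if_false, Bool.false_eq_true]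
      have hca : (acc ++ [ch]).count c = acc.count c + (if c = ch then 1 else 0) := by
        rcases eq_or_ne c ch with rfl | hne
        · simp [List.count_append]
        · simp [List.count_append, hne, Ne.symm hne]
      obtain ⟨h1, h2⟩ := ih b (acc ++ [ch])
      rw [hl]
      refine ⟨?_, ?_⟩
      · rw [h1, hca, hcc]
        split_ifs with h
        · subst h; omega
        · omega
      · rw [h2, hcc]
        split_ifs with h
        · subst h; omega
        · omega

-- PySem.Set.ofList basics: length bound, equality cases
theorem foldl_add_len_le (l acc : List Char) :
    (l.foldl PySem.Set.add acc).length ≤ acc.length + l.length := by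
  induction l generalizing acc with
  | nil => simp
  | cons x l ih =>
    simp only [List.foldl_cons]
    refine le_trans (ih _) ?_
    by_cases h : (PySem.Set.add acc x).length ≤ acc.length + 1
    · simp only [List.length_cons]; omega
    · exfalso
      apply h
      unfold PySem.Set.add
      split <;> simp

theorem foldl_add_eq_append (l acc : List Char) (h : (acc ++ l).Nodup) :
    l.foldl PySem.Set.add acc = acc ++ l := by
  induction l generalizing acc with
  | nil => simp
  | cons x l ih =>
    have hx : x ∉ acc := by
      intro hx
      have := List.disjoint_of_nodup_append h
      exact this hx (by simp)
    have hadd : PySem.Set.add acc x = acc ++ [x] := by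
      unfold PySem.Set.add PySem.Set.contains
      simp [hx]
    have h' : ((acc ++ [x]) ++ l).Nodup := by
      simpa [List.append_assoc] using h
    simp only [List.foldl_cons, hadd, ih _ h', List.append_assoc, List.singleton_append]

theorem foldl_add_len_eq_imp (l acc : List Char) (hacc : acc.Nodup)
    (h : (l.foldl PySem.Set.add acc).length = acc.length + l.length) :
    (acc ++ l).Nodup := by
  induction l generalizing acc with
  | nil => simpa using hacc
  | cons x l ih =>
    by_cases hx : x ∈ acc
    · exfalso
      have hadd : PySem.Set.add acc x = acc := by
        unfold PySem.Set.add PySem.Set.contains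
        simp [hx]
      have := foldl_add_len_le l acc
      simp only [List.foldl_cons, hadd] at h
      simp only [List.length_cons] at h
      omega
    · have hadd : PySem.Set.add acc x = acc ++ [x] := by
        unfold PySem.Set.add PySem.Set.contains
        simp [hx]
      simp only [List.foldl_cons, hadd] at h
      have hax : (acc ++ [x]).Nodup :=
        List.Nodup.append hacc (List.nodup_singleton x) (by simp [List.disjoint_singleton, hx])
      have h' := ih (acc ++ [x]) hax
        (by
          have hlen : (acc ++ [x]).length = acc.length + 1 := by simp
          rw [hlen]
          simp only [List.length_cons] at h
          omega)
      simpa [List.append_assoc] using h'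

theorem ofList_len_eq_iff (l : List Char) :
    (PySem.Set.ofList l).length = l.length ↔ l.Nodup := by
  rw [PySem.Set.ofList_eq_foldl]
  constructor
  · intro h
    have := foldl_add_len_eq_imp l [] (by simp) (by simpa using h)
    simpa using this
  · intro h
    rw [foldl_add_eq_append l [] (by simpa using h)]
    simp

-- the concatenated leftover list of B, as a function of the two character lists
def gapE (l1 l2 : List Char) : List Char :=
  (loopB (l1.filter pvIsUpper) (l2.filter pvIsUpper) []).1 ++
  (loopB (l1.filter pvIsUpper) (l2.filter pvIsUpper) []).2

theorem gapE_count (l1 l2 : List Char) (c : Char) :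
    (gapE l1 l2).count c =
      ((l1.filter pvIsUpper).count c - (l2.filter pvIsUpper).count c) +
      ((l2.filter pvIsUpper).count c - (l1.filter pvIsUpper).count c) := by
  obtain ⟨h1, h2⟩ := loopB_count c (l1.filter pvIsUpper) (l2.filter pvIsUpper) []
  simp [gapE, List.count_append, h1, h2]

theorem count_filter_upper (l : List Char) (c : Char) (hc : c ∈ pvUpper) :
    (l.filter pvIsUpper).count c = l.count c := by
  have hp : pvIsUpper c = true := by simpa [pvIsUpper] using hc
  exact List.count_filter hp

theorem gapE_count_int (l1 l2 : List Char) (c : Char) (hc : c ∈ pvUpper) :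
    ((gapE l1 l2).count c : Int) = |((l1.count c : Int) - (l2.count c : Int))| := by
  have h := gapE_count l1 l2 c
  rw [count_filter_upper _ _ hc, count_filter_upper _ _ hc] at h
  rcases abs_cases ((l1.count c : Int) - (l2.count c : Int)) with ⟨h1, h2⟩ | ⟨h1, h2⟩ <;>
    rw [h1, h] <;> omega

theorem gapE_count_notin (l1 l2 : List Char) (c : Char) (hc : c ∉ pvUpper) :
    (gapE l1 l2).count c = 0 := by
  have h := gapE_count l1 l2 c
  have z1 : (l1.filter pvIsUpper).count c = 0 :=
    List.count_eq_zero.2 (fun hm => hc (by simpa [pvIsUpper] using (List.mem_filter.1 hm).2))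
  have z2 : (l2.filter pvIsUpper).count c = 0 :=
    List.count_eq_zero.2 (fun hm => hc (by simpa [pvIsUpper] using (List.mem_filter.1 hm).2))
  omega

theorem gapE_mem_upper (l1 l2 : List Char) (c : Char) (hc : c ∈ gapE l1 l2) :
    c ∈ pvUpper := by
  by_contra h
  have := gapE_count_notin l1 l2 c h
  have := List.count_pos_iff.2 hc
  omega

theorem A_any_iff (l1 l2 : List Char) :
    ((pvUpper.map (fun c => |((l1.count c : Int) - (l2.count c : Int))|)).any
      (fun x => x > 1) = true) ↔ ¬ (gapE l1 l2).Nodup := by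
  rw [List.any_eq_true]
  constructor
  · rintro ⟨x, hx, hgt⟩ hnod
    obtain ⟨c, hc, rfl⟩ := List.mem_map.1 hx
    have hle := List.nodup_iff_count_le_one.1 hnod c
    have hint := gapE_count_int l1 l2 c hc
    rw [← hint] at hgt
    simp only [decide_eq_true_eq] at hgt
    omega
  · intro hnod
    have hex : ∃ c, 1 < (gapE l1 l2).count c := by
      by_contra hall
      push Not at hall
      exact hnod (List.nodup_iff_count_le_one.2 (fun a => by have := hall a; omega))
    obtain ⟨c, hcgt⟩ := hex
    have hmem : c ∈ gapE l1 l2 := List.count_pos_iff.1 (by omega)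
    have hc := gapE_mem_upper l1 l2 c hmem
    refine ⟨_, List.mem_map.2 ⟨c, hc, rfl⟩, ?_⟩
    have hint := gapE_count_int l1 l2 c hc
    simp only [decide_eq_true_eq]
    rw [← hint]
    exact_mod_cast hcgt

theorem A_cnt_eq (l1 l2 : List Char) (h : (gapE l1 l2).Nodup) :
    (((pvUpper.map (fun c => |((l1.count c : Int) - (l2.count c : Int))|)).filter
      (fun x => x = 1)).length = (gapE l1 l2).length) := by
  rw [List.filter_map, List.length_map]
  have hcong : pvUpper.filter ((fun x : Int => decide (x = 1)) ∘
        (fun c => |((l1.count c : Int) - (l2.count c : Int))|)) =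
      pvUpper.filter (fun c => decide (c ∈ gapE l1 l2)) := by
    refine List.filter_congr (fun c hc => ?_)
    have hint := gapE_count_int l1 l2 c hc
    have hle := List.nodup_iff_count_le_one.1 h c
    simp only [Function.comp, decide_eq_decide]
    rw [← hint]
    constructor
    · intro h1
      have : (gapE l1 l2).count c = 1 := by exact_mod_cast h1
      exact List.count_pos_iff.1 (by omega)
    · intro hm
      have : 1 ≤ (gapE l1 l2).count c := List.count_pos_iff.2 hm
      have : (gapE l1 l2).count c = 1 := by omega
      exact_mod_cast this
  rw [hcong]
  have hperm : List.Perm (pvUpper.filter (fun c => decide (c ∈ gapE l1 l2))) (gapE l1 l2) := by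
    refine (List.perm_ext_iff_of_nodup (List.Nodup.filter _ (by decide)) h).2 (fun a => ?_)
    simp only [List.mem_filter, decide_eq_true_eq]
    exact ⟨fun hx => hx.2, fun hx => ⟨gapE_mem_upper l1 l2 a hx, hx⟩⟩
  exact hperm.length_eq

-- ===== VERDICT (by name: the statement is the Claim_ definition above) =====
theorem check_spec : Claim_equal_check := by
  intro s1 s2 _
  unfold Spec_check check check_alt
  simp only [checkLoop_eq, count_pad]
  have hfold : (loopB (s1.toList.filter pvIsUpper) (s2.toList.filter pvIsUpper) []).1 ++
      (loopB (s1.toList.filter pvIsUpper) (s2.toList.filter pvIsUpper) []).2 =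
      gapE s1.toList s2.toList := rfl
  by_cases hnod : (gapE s1.toList s2.toList).Nodup
  · have ha : ¬ ((pvUpper.map (fun c =>
        |((s1.toList.count c : Int) - (s2.toList.count c : Int))|)).any
        (fun x => x > 1) = true) := fun hx => ((A_any_iff _ _).1 hx) hnod
    have hb : (PySem.Set.ofList (gapE s1.toList s2.toList)).length =
        (gapE s1.toList s2.toList).length := (ofList_len_eq_iff _).2 hnod
    rw [Bool.not_eq_true] at ha
    simp only [hfold, ha, if_false, Bool.false_eq_true, hb, ne_eq, not_true_eq_false,
      zero_add, A_cnt_eq _ _ hnod]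
    by_cases h0 : (gapE s1.toList s2.toList).length = 0
    · simp [List.length_eq_zero_iff.1 h0]
    · have hne : ¬ gapE s1.toList s2.toList = [] := fun hx => h0 (by simp [hx])
      have hz : ¬ ((gapE s1.toList s2.toList).length : Int) = 0 := by
        intro hx; exact h0 (by exact_mod_cast hx)
      simp only [hz, if_false, hne]
      by_cases hlen : s1.toList.length = s2.toList.length
      · simp only [hlen, if_true]
        by_cases h2 : (gapE s1.toList s2.toList).length = 2
        · simp [h2]
        · have : ¬ ((gapE s1.toList s2.toList).length : Int) = 2 := by
            intro hx; exact h2 (by exact_mod_cast hx)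
          simp [h2, this]
      · simp only [hlen, if_false]
        by_cases h1 : (gapE s1.toList s2.toList).length = 1
        · simp [h1]
        · have : ¬ ((gapE s1.toList s2.toList).length : Int) = 1 := by
            intro hx; exact h1 (by exact_mod_cast hx)
          simp [h1, this]
  · have ha := (A_any_iff s1.toList s2.toList).2 hnod
    have hb : (PySem.Set.ofList (gapE s1.toList s2.toList)).length ≠
        (gapE s1.toList s2.toList).length := fun hx => hnod ((ofList_len_eq_iff _).1 hx)
    simp [hfold, ha, hb]
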